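-- pv_equiv track=rewrite | github.com/StevenVC-P/PrimeHunter | primehunter/analysis/euclid.py | _generate_products
-- ===== SOURCE A (Python) =====
-- def _generate_products(current_primes, limit, allow_repeated_factors):
--     products = {}
--
--     def generate(product, exponents, index):
--         if product >= limit:
--             return
--         products[product] = exponents.copy()
--
--         for i in range(index, len(current_primes)):
--             prime_value = current_primes[i]
--             if not allow_repeated_factors and prime_value in exponents:
--                 continue
--
--             next_index = i if allow_repeated_factors else i + 1
--             next_product = product * prime_value
--             if next_product < limit:
--                 new_exponents = exponents.copy()
--                 new_exponents[prime_value] = new_exponents.get(prime_value, 0) + 1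
--                 generate(next_product, new_exponents, next_index)
--
--     generate(1, {}, 0)
--     return products
-- ===== SOURCE B (Python) =====
-- # Iterative explicit-stack DFS replacing A's recursive closure; same preorder, so the
-- # products dict is built in exactly the same insertion order with the same values.
-- def _bump(exponents, p):
--     grown = dict(exponents)
--     grown[p] = grown.get(p, 0) + 1
--     return grown
--
--
-- def _generate_products(current_primes, limit, allow_repeated_factors):
--     products = {}
--     if limit <= 1:
--         return products
--     n = len(current_primes)
--     stack = [(1, {}, 0)]
--     while stack:
--         product, exponents, index = stack.pop()
--         products[product] = exponents
--         children = [
--             (product * current_primes[i], _bump(exponents, current_primes[i]),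
--              i if allow_repeated_factors else i + 1)
--             for i in range(index, n)
--             if (allow_repeated_factors or current_primes[i] not in exponents)
--             and product * current_primes[i] < limit
--         ]
--         stack.extend(reversed(children))
--     return products
-- ===== Notes on version B (the rewrite author's own statement) =====
-- stated objective: alternative
-- what changed: The recursive nested generate() closure is replaced by an iterative explicit-stack DFS worklist: each popped frame is recorded, its valid children are collected by one list comprehension (via a _bump helper for the exponent copy) and pushed in reverse so the exact preorder, and hence A's exact dict insertion order and values, is preserved without any recursion.
-- outside the precondition, e.g. on _generate_products([-3], 2, True): A returns {1: {}, -3: {-3: 1}}, B returns {1: {}, -3: {-3: 1}}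
import Mathlib
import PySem

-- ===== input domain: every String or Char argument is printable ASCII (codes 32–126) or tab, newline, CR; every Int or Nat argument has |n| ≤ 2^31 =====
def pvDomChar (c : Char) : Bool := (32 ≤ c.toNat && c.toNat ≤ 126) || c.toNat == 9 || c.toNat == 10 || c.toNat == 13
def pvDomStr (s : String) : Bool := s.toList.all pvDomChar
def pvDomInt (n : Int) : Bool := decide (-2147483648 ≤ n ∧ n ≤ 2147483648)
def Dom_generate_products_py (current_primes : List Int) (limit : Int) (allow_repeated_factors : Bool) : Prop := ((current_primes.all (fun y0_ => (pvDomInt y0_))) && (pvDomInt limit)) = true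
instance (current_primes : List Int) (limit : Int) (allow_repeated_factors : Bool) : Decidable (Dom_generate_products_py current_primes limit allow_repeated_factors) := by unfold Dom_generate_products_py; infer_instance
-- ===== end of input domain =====

-- B replaces A's recursive nested closure by an iterative explicit-stack DFS (same preorder,
-- hence the same dict insertion order and values); objective: alternative, not faster.
-- Both ports use a fuel of current_primes.length + 64, which bounds the recursion/stack depth
-- on every input admitted by Pre_ (the two ports consume fuel in lockstep, so the equivalence
-- below holds for every fuel; fuel only matters for faithfulness to the Pythons).

-- ===== PORT A =====
-- the nested closure generate(product, exponents, index); `index` is the int loop start,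
-- always a natural number here, so it is carried as a Nat and range(index, len(...)) is
-- (List.range len).drop index; current_primes[i] with 0 ≤ i < len is exact as getD i 0.
def generate_products_py_gen (current_primes : List Int) (limit : Int) (allow_repeated_factors : Bool) (fuel : Nat) (product : Int) (exponents : PySem.Dict Int Int) (index : Nat) (products : PySem.Dict Int (PySem.Dict Int Int)) : PySem.Dict Int (PySem.Dict Int Int) :=
  match fuel with
  | 0 => products
  | f + 1 =>
    if limit ≤ product then products
    else
      ((List.range current_primes.length).drop index).foldl
        (fun prods i =>
          let prime_value := current_primes.getD i 0
          if !allow_repeated_factors && exponents.contains prime_value then prods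
          else
            let next_index := if allow_repeated_factors then i else i + 1
            let next_product := product * prime_value
            if next_product < limit then
              generate_products_py_gen current_primes limit allow_repeated_factors f next_product
                (exponents.insert prime_value (exponents.getD prime_value 0 + 1)) next_index prods
            else prods)
        (products.insert product exponents)
termination_by fuel

def generate_products_py (current_primes : List Int) (limit : Int) (allow_repeated_factors : Bool) : List (Int × List (Int × Int)) :=
  (generate_products_py_gen current_primes limit allow_repeated_factors (current_primes.length + 64) 1 PySem.Dict.empty 0 PySem.Dict.empty).items.map (fun kv => (kv.1, kv.2.items))

-- ===== PORT B =====
-- helper _bump(exponents, p)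
def generate_products_py_bump (exponents : PySem.Dict Int Int) (p : Int) : PySem.Dict Int Int :=
  exponents.insert p (exponents.getD p 0 + 1)

-- the children list comprehension of one popped frame; frames additionally carry the port's
-- per-frame fuel (first component), a totality guard the Python does not need
def generate_products_py_children (current_primes : List Int) (limit : Int) (allow_repeated_factors : Bool) (f : Nat) (product : Int) (exponents : PySem.Dict Int Int) (index : Nat) : List (Nat × Int × PySem.Dict Int Int × Nat) :=
  ((List.range current_primes.length).drop index).filterMap (fun i =>
    if (allow_repeated_factors || !exponents.contains (current_primes.getD i 0))
        && product * current_primes.getD i 0 < limit then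
      some (f, product * current_primes.getD i 0,
            generate_products_py_bump exponents (current_primes.getD i 0),
            if allow_repeated_factors then i else i + 1)
    else none)

-- used only by the termination measure of the while-loop below
theorem pv_sum_filterMap_ite_le {α : Type} (c : α → Bool) (W : Nat) :
    ∀ l : List α, ((l.filterMap (fun x => if c x then some W else none)).sum ≤ l.length * W) := by
  intro l
  induction l with
  | nil => simp
  | cons a l ih =>
    by_cases h : c a = true <;> simp [h, Nat.succ_mul] <;> omega

theorem pv_children_wsum_lt (current_primes : List Int) (limit : Int) (allow_repeated_factors : Bool) (f : Nat) (product : Int) (exponents : PySem.Dict Int Int) (index : Nat) :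
    ((generate_products_py_children current_primes limit allow_repeated_factors f product exponents index).map
      (fun fr => (current_primes.length + 1) ^ fr.1)).sum < (current_primes.length + 1) ^ (f + 1) := by
  unfold generate_products_py_children
  rw [List.map_filterMap]
  have h1 : ∀ i : Nat, (if (allow_repeated_factors || !exponents.contains (current_primes.getD i 0))
        && product * current_primes.getD i 0 < limit then
      some (f, product * current_primes.getD i 0,
            generate_products_py_bump exponents (current_primes.getD i 0),
            if allow_repeated_factors then i else i + 1)
    else none).map (fun fr => (current_primes.length + 1) ^ fr.1)
      = (if (allow_repeated_factors || !exponents.contains (current_primes.getD i 0))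
        && product * current_primes.getD i 0 < limit then some ((current_primes.length + 1) ^ f) else none) := by
    intro i; split <;> rfl
  simp only [h1]
  have h2 := pv_sum_filterMap_ite_le
    (fun i : Nat => (allow_repeated_factors || !exponents.contains (current_primes.getD i 0))
        && product * current_primes.getD i 0 < limit)
    ((current_primes.length + 1) ^ f) ((List.range current_primes.length).drop index)
  have h3 : ((List.range current_primes.length).drop index).length ≤ current_primes.length := by
    simp [List.length_drop]
  have h4 : 0 < (current_primes.length + 1) ^ f := pow_pos (by omega) f
  have h5 : current_primes.length * (current_primes.length + 1) ^ f
      < (current_primes.length + 1) ^ (f + 1) := by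
    rw [pow_succ, Nat.mul_comm ((current_primes.length + 1) ^ f) (current_primes.length + 1)]
    exact Nat.mul_lt_mul_of_lt_of_le (by omega) (le_refl _) h4
  calc _ ≤ ((List.range current_primes.length).drop index).length * (current_primes.length + 1) ^ f := h2
    _ ≤ current_primes.length * (current_primes.length + 1) ^ f := Nat.mul_le_mul_right _ h3
    _ < _ := h5

-- the while-loop over the explicit stack (head = top of stack; children are pushed so that
-- the first child is popped next, exactly like stack.extend(reversed(children)) + pop())
def generate_products_py_stack (current_primes : List Int) (limit : Int) (allow_repeated_factors : Bool) (stack : List (Nat × Int × PySem.Dict Int Int × Nat)) (products : PySem.Dict Int (PySem.Dict Int Int)) : PySem.Dict Int (PySem.Dict Int Int) :=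
  match stack with
  | [] => products
  | (0, _, _, _) :: rest => generate_products_py_stack current_primes limit allow_repeated_factors rest products
  | (f + 1, product, exponents, index) :: rest =>
      generate_products_py_stack current_primes limit allow_repeated_factors
        (generate_products_py_children current_primes limit allow_repeated_factors f product exponents index ++ rest)
        (products.insert product exponents)
termination_by (stack.map (fun fr => (current_primes.length + 1) ^ fr.1)).sum
decreasing_by
  · simp
  · have := pv_children_wsum_lt current_primes limit allow_repeated_factors f product exponents index
    simp only [List.map_cons, List.sum_cons, List.map_append, List.sum_append,
      Nat.succ_eq_add_one]
    omega

def generate_products_py_alt (current_primes : List Int) (limit : Int) (allow_repeated_factors : Bool) : List (Int × List (Int × Int)) :=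
  if limit ≤ 1 then []
  else
    (generate_products_py_stack current_primes limit allow_repeated_factors
      [(current_primes.length + 64, 1, PySem.Dict.empty, 0)] PySem.Dict.empty).items.map
      (fun kv => (kv.1, kv.2.items))

-- ===== PRECONDITION & SPEC =====
-- When repeated factors are allowed, A's recursion is unbounded (Python RecursionError) as soon
-- as a prime of magnitude ≤ 1, or a negative prime together with a later positive one, stays
-- below the limit; Pre_ conservatively requires, for allow_repeated_factors, limit ≤ 1 or all
-- primes ≥ 2 — this also excludes some negative-prime inputs on which A still returns (cited).
def Pre_generate_products_py (current_primes : List Int) (limit : Int) (allow_repeated_factors : Bool) : Prop :=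
  allow_repeated_factors = true → (limit ≤ 1 ∨ ∀ p ∈ current_primes, 2 ≤ p)
instance (current_primes : List Int) (limit : Int) (allow_repeated_factors : Bool) : Decidable (Pre_generate_products_py current_primes limit allow_repeated_factors) := by unfold Pre_generate_products_py; infer_instance

def pvWitness_generate_products_py : List Int × Int × Bool := ([2, 3, 5], 30, true)

def Spec_generate_products_py (current_primes : List Int) (limit : Int) (allow_repeated_factors : Bool) (out : List (Int × List (Int × Int))) : Prop := out = generate_products_py_alt current_primes limit allow_repeated_factors
instance (current_primes : List Int) (limit : Int) (allow_repeated_factors : Bool) (out : List (Int × List (Int × Int))) : Decidable (Spec_generate_products_py current_primes limit allow_repeated_factors out) := by unfold Spec_generate_products_py; infer_instance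

-- ===== CLAIM (what is proved, stated in full; the proofs are below) =====
def Claim_equal_generate_products_py : Prop := ∀ (current_primes : List Int) (limit : Int) (allow_repeated_factors : Bool), Dom_generate_products_py current_primes limit allow_repeated_factors → Pre_generate_products_py current_primes limit allow_repeated_factors → Spec_generate_products_py current_primes limit allow_repeated_factors (generate_products_py current_primes limit allow_repeated_factors)

-- ===== LEMMAS AND PROOFS =====

theorem pv_gen_zero (current_primes : List Int) (limit : Int) (allow : Bool) (product : Int) (exponents : PySem.Dict Int Int) (index : Nat) (products : PySem.Dict Int (PySem.Dict Int Int)) :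
    generate_products_py_gen current_primes limit allow 0 product exponents index products = products := by
  rw [generate_products_py_gen]

-- one popped frame: A's recursive call on the frame equals "record, then fold A over the
-- frame's children list" — the heart of the recursion ↔ worklist correspondence
theorem pv_gen_eq_children (current_primes : List Int) (limit : Int) (allow : Bool) (f : Nat) (product : Int) (exponents : PySem.Dict Int Int) (index : Nat) (products : PySem.Dict Int (PySem.Dict Int Int)) (h : product < limit) :
    generate_products_py_gen current_primes limit allow (f + 1) product exponents index products
      = (generate_products_py_children current_primes limit allow f product exponents index).foldl
          (fun d fr => generate_products_py_gen current_primes limit allow fr.1 fr.2.1 fr.2.2.1 fr.2.2.2 d)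
          (products.insert product exponents) := by
  rw [generate_products_py_gen]
  rw [if_neg (not_le.mpr h)]
  unfold generate_products_py_children
  rw [List.foldl_filterMap]
  congr 1
  funext d i
  cases ha : allow <;> cases hc : exponents.contains (current_primes.getD i 0) <;>
    by_cases hnp : product * current_primes.getD i 0 < limit <;>
      (simp only [List.getD_eq_getElem?_getD] at hc hnp ⊢) <;>
        simp [hc, hnp, generate_products_py_bump]

theorem pv_mem_children_lt (current_primes : List Int) (limit : Int) (allow : Bool) (f : Nat) (product : Int) (exponents : PySem.Dict Int Int) (index : Nat) (fr : Nat × Int × PySem.Dict Int Int × Nat) (hfr : fr ∈ generate_products_py_children current_primes limit allow f product exponents index) :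
    fr.2.1 < limit := by
  unfold generate_products_py_children at hfr
  rw [List.mem_filterMap] at hfr
  obtain ⟨i, _, hi⟩ := hfr
  by_cases hc : ((allow || !exponents.contains (current_primes.getD i 0))
        && product * current_primes.getD i 0 < limit) = true
  · rw [if_pos hc] at hi
    cases hi
    simpa using (Bool.and_elim_right hc)
  · rw [if_neg hc] at hi
    cases hi

-- running the worklist equals folding A's recursive generate over the pending frames,
-- provided every pending product is below the limit
theorem pv_stack_eq (current_primes : List Int) (limit : Int) (allow : Bool) :
    ∀ (stack : List (Nat × Int × PySem.Dict Int Int × Nat)) (products : PySem.Dict Int (PySem.Dict Int Int)),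
      (∀ fr ∈ stack, fr.2.1 < limit) →
      generate_products_py_stack current_primes limit allow stack products
        = stack.foldl (fun d fr => generate_products_py_gen current_primes limit allow fr.1 fr.2.1 fr.2.2.1 fr.2.2.2 d) products := by
  intro stack products
  fun_induction generate_products_py_stack current_primes limit allow stack products with
  | case1 products => intro _; simp
  | case2 products p e i rest ih =>
    intro h
    rw [ih (fun fr hfr => h fr (List.mem_cons_of_mem _ hfr))]
    simp [pv_gen_zero]
  | case3 products f product exponents index rest ih =>
    intro h
    have hprod : product < limit := h (f + 1, product, exponents, index) List.mem_cons_self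
    have hch : ∀ fr ∈ generate_products_py_children current_primes limit allow f product exponents index ++ rest, fr.2.1 < limit := by
      intro fr hfr
      rcases List.mem_append.mp hfr with hfr | hfr
      · exact pv_mem_children_lt current_primes limit allow f product exponents index fr hfr
      · exact h fr (List.mem_cons_of_mem _ hfr)
    rw [ih hch, List.foldl_append, List.foldl_cons,
      pv_gen_eq_children current_primes limit allow f product exponents index products hprod]

-- ===== VERDICT (by name: the statement is the Claim_ definition above) =====
theorem generate_products_py_spec : Claim_equal_generate_products_py := by
  intro current_primes limit allow _dom _pre
  unfold Spec_generate_products_py generate_products_py generate_products_py_alt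
  by_cases hl : limit ≤ 1
  · rw [if_pos hl]
    have h64 : current_primes.length + 64 = (current_primes.length + 63) + 1 := rfl
    rw [h64, generate_products_py_gen, if_pos hl]
    rfl
  · rw [if_neg hl]
    rw [pv_stack_eq current_primes limit allow _ _ (by
      intro fr hfr
      simp only [List.mem_singleton] at hfr
      subst hfr
      show (1 : Int) < limit
      omega)]
    simp
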